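-- pv_equiv track=rewrite | github.com/MrBrantCode/unitest_baseline | mut_generate/mist_train_cf/cf_53626/solution.py | find_sublists
-- ===== SOURCE A (Python) =====
-- def find_sublists(lst):
--     def is_prime(n):
--         if n <= 1:
--             return False
--         if n == 2:
--             return True
--         if n % 2 == 0:
--             return False
--         sqr = int(n**0.5) + 1
--         for divisor in range(3, sqr, 2):
--             if n % divisor == 0:
--                 return False
--         return True
--
--     def is_fibonacci(n):
--         a, b = 0, 1
--         while b < n:
--             a, b = b, a+b
--         return b == n
--
--     primes_fibs = [(num, i) for i, num in enumerate(lst) if isinstance(num, int) and num >= 0 and (is_prime(num) or is_fibonacci(num))]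
--
--     if not primes_fibs:
--         return []
--
--     start, end = primes_fibs[0][1], primes_fibs[0][1]
--     max_length = 1
--     max_sublists = [(start, end)]
--
--     for i in range(1, len(primes_fibs)):
--         if primes_fibs[i][1] - primes_fibs[i-1][1] == 1:
--             end = primes_fibs[i][1]
--             if end - start + 1 > max_length:
--                 max_length = end - start + 1
--                 max_sublists = [(start, end)]
--             elif end - start + 1 == max_length:
--                 max_sublists.append((start, end))
--         else:
--             start, end = primes_fibs[i][1], primes_fibs[i][1]
--
--     return max_sublists
-- ===== SOURCE B (Python) =====
-- def find_sublists(lst):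
--     def is_prime(n):
--         if n <= 1:
--             return False
--         if n == 2:
--             return True
--         if n % 2 == 0:
--             return False
--         sqr = int(n**0.5) + 1
--         for divisor in range(3, sqr, 2):
--             if n % divisor == 0:
--                 return False
--         return True
--
--     def is_fibonacci(n):
--         a, b = 0, 1
--         while b < n:
--             a, b = b, a+b
--         return b == n
--
--     idxs = [i for i, num in enumerate(lst)
--             if isinstance(num, int) and num >= 0 and (is_prime(num) or is_fibonacci(num))]
--
--     # Phase 1: group the qualifying indices into maximal runs of consecutive indices.
--     runs = []
--     for i in idxs:
--         if runs and runs[-1][1] == i - 1: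
--             runs[-1] = (runs[-1][0], i)
--         else:
--             runs.append((i, i))
--
--     if not runs:
--         return []
--     # Phase 2: keep the runs of maximal length.  When every run is a singleton
--     # (no two qualifying indices are adjacent) only the first one is reported.
--     m = max(e - s for s, e in runs)
--     if m == 0:
--         return [runs[0]]
--     return [(s, e) for s, e in runs if e - s == m]
-- ===== Notes on version B (the rewrite author's own statement) =====
-- stated objective: simpler
-- what changed: A's single online scan that mutates start/end/max_length/max_sublists (wiping or appending inside the loop) is replaced by a two-phase decomposition: group the qualifying indices into maximal consecutive runs, then select the runs of maximal length (with the first-singleton rule when no two qualifying indices are adjacent).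
import Mathlib
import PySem

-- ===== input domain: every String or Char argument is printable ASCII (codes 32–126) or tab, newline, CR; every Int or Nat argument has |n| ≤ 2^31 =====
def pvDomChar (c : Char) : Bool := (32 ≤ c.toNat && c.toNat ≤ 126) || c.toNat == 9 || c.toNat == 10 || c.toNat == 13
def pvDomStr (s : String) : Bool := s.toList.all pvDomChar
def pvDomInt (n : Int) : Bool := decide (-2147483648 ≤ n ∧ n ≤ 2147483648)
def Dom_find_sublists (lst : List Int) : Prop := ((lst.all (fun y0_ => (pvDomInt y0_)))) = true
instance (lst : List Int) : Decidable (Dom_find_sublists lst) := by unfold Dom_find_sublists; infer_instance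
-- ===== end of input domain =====

-- B replaces A's online scan (mutating start/end/max_length/max_sublists in one loop) by a
-- two-phase decomposition — group qualifying indices into maximal consecutive runs, then select
-- the runs of maximal length — for simplicity; same asymptotic cost.

-- ===== PORT A =====
-- shared helper texts: A's and B's Python contain the identical nested is_prime / is_fibonacci
def pvIsPrime (n : Int) : Bool :=
  if n ≤ 1 then false
  else if n = 2 then true
  else if PySem.Int.mod n 2 = 0 then false
  else
    -- sqr = int(n**0.5) + 1 : CPython's correctly-rounded float sqrt truncated equals
    -- Nat.sqrt exactly for the admitted magnitudes (|n| ≤ 2^31)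
    (PySem.List.pyRange 3 ((Nat.sqrt n.toNat : Int) + 1) 2).all (fun d => !(PySem.Int.mod n d == 0))

-- while b < n: a, b = b, a+b — fuel-guarded loop; fuel 64 is never exhausted for |n| ≤ 2^31
def pvFibLoop (n : Int) : Nat → Int → Int → Bool
  | 0, _, b => b == n
  | fuel+1, a, b => if b < n then pvFibLoop n fuel b (a + b) else b == n

def pvIsFib (n : Int) : Bool := pvFibLoop n 64 0 1

def pvQualTest (p : Int × Int) : Bool := decide (0 ≤ p.2) && (pvIsPrime p.2 || pvIsFib p.2)

-- the for-loop over range(1, len(primes_fibs)), reading primes_fibs[i][1] and primes_fibs[i-1][1],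
-- transcribed as structural recursion over the remaining indices carrying prev = primes_fibs[i-1][1]
def pvLoopA : Int → Int → Int → Int → List (Int × Int) → List Int → List (Int × Int)
  | _, _, _, _, acc, [] => acc
  | prev, start, _endv, maxlen, acc, cur :: rest =>
    if cur - prev = 1 then
      let endv' := cur
      if endv' - start + 1 > maxlen then
        pvLoopA cur start endv' (endv' - start + 1) [(start, endv')] rest
      else if endv' - start + 1 = maxlen then
        pvLoopA cur start endv' maxlen (acc ++ [(start, endv')]) rest
      else
        pvLoopA cur start endv' maxlen acc rest
    else
      pvLoopA cur cur cur maxlen acc rest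

def find_sublists (lst : List Int) : List (Int × Int) :=
  let primes_fibs : List (Int × Int) :=
    ((PySem.List.enumerate lst 0).filter pvQualTest).map (fun p => (p.2, p.1))
  match primes_fibs with
  | [] => []
  | p0 :: rest => pvLoopA p0.2 p0.2 p0.2 1 [(p0.2, p0.2)] (rest.map (fun q => q.2))

-- ===== PORT B =====
-- one step of B's run-grouping loop: extend the last run or open a new one
def pvAddRun (runs : List (Int × Int)) (i : Int) : List (Int × Int) :=
  match runs.getLast? with
  | some (s, e) => if e = i - 1 then runs.dropLast ++ [(s, i)] else runs ++ [(i, i)]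
  | none => runs ++ [(i, i)]

def find_sublists_alt (lst : List Int) : List (Int × Int) :=
  let idxs : List Int :=
    ((PySem.List.enumerate lst 0).filter pvQualTest).map (fun p => p.1)
  let runs : List (Int × Int) := idxs.foldl pvAddRun []
  match runs with
  | [] => []
  | r0 :: _ =>
    match (runs.map (fun r => r.2 - r.1)).max? with
    | none => []   -- unreachable: runs is non-empty here
    | some m => if m = 0 then [r0] else runs.filter (fun r => r.2 - r.1 == m)

-- ===== PRECONDITION & SPEC =====
def Spec_find_sublists (lst : List Int) (out : List (Int × Int)) : Prop := out = find_sublists_alt lst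
instance (lst : List Int) (out : List (Int × Int)) : Decidable (Spec_find_sublists lst out) := by unfold Spec_find_sublists; infer_instance

-- ===== CLAIM (what is proved, stated in full; the proofs are below) =====
def Claim_equal_find_sublists : Prop := ∀ (lst : List Int), Dom_find_sublists lst → Spec_find_sublists lst (find_sublists lst)

-- ===== LEMMAS AND PROOFS =====

-- proof-side grouping of a sequence of indices into maximal consecutive runs,
-- with (s, p) the currently open run
def pvGrp (s p : Int) : List Int → List (Int × Int)
  | [] => [(s, p)]
  | cur :: rest => if cur - p = 1 then pvGrp s cur rest else (s, p) :: pvGrp cur cur rest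

-- maximal run length (0 for no runs)
def pvMaxLen : List (Int × Int) → Int
  | [] => 0
  | r :: rs => max (r.2 - r.1 + 1) (pvMaxLen rs)

theorem pvGrp_head (xs : List Int) : ∀ s p : Int, ∃ e rs, pvGrp s p xs = (s, e) :: rs ∧ p ≤ e := by
  induction xs with
  | nil => intro s p; exact ⟨p, [], rfl, le_refl p⟩
  | cons cur rest ih =>
    intro s p
    by_cases h : cur - p = 1
    · obtain ⟨e, rs, heq, hle⟩ := ih s cur
      exact ⟨e, rs, by simp [pvGrp, h, heq], by omega⟩
    · exact ⟨p, pvGrp cur cur rest, by simp [pvGrp, h], le_refl p⟩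

theorem le_pvMaxLen {r : Int × Int} {R : List (Int × Int)} (h : r ∈ R) :
    r.2 - r.1 + 1 ≤ pvMaxLen R := by
  induction R with
  | nil => cases h
  | cons r0 rs ih =>
    rcases List.mem_cons.mp h with h0 | h0
    · subst h0; simp [pvMaxLen]
    · simp [pvMaxLen]; exact Or.inr (ih h0)

theorem pvGrp_mem_le (xs : List Int) : ∀ s p : Int, s ≤ p → ∀ r ∈ pvGrp s p xs, r.1 ≤ r.2 := by
  induction xs with
  | nil =>
    intro s p hsp r hr
    simp [pvGrp] at hr
    subst hr; simpa using hsp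
  | cons cur rest ih =>
    intro s p hsp r hr
    by_cases h : cur - p = 1
    · simp only [pvGrp, h, if_pos] at hr
      exact ih s cur (by omega) r hr
    · simp only [pvGrp, if_neg h, List.mem_cons] at hr
      rcases hr with hr | hr
      · subst hr; simpa using hsp
      · exact ih cur cur le_rfl r hr

theorem pvMaxLen_grp_ge (xs : List Int) (s p : Int) (_hsp : s ≤ p) :
    p - s + 1 ≤ pvMaxLen (pvGrp s p xs) := by
  obtain ⟨e, rs, heq, hle⟩ := pvGrp_head xs s p
  have : (s, e).2 - (s, e).1 + 1 ≤ pvMaxLen (pvGrp s p xs) := le_pvMaxLen (by rw [heq]; exact List.mem_cons_self)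
  simp at this; omega

-- selection of the contributions appended by A's loop when the maximum does not grow
def pvSel (prev maxlen : Int) : List (Int × Int) → List (Int × Int)
  | [] => []
  | r0 :: rs =>
    (if r0.2 - r0.1 + 1 = maxlen ∧ prev < r0.2 then [r0] else [])
      ++ rs.filter (fun r => decide (r.2 - r.1 + 1 = maxlen ∧ 2 ≤ r.2 - r.1 + 1))

-- the characterisation of A's online loop in terms of runs
theorem pvLoopA_eq : ∀ (rest : List Int) (prev start maxlen : Int) (acc : List (Int × Int)),
    start ≤ prev → prev - start + 1 ≤ maxlen →
    pvLoopA prev start prev maxlen acc rest =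
      (if maxlen < pvMaxLen (pvGrp start prev rest) then
        (pvGrp start prev rest).filter (fun r => decide (r.2 - r.1 + 1 = pvMaxLen (pvGrp start prev rest)))
      else
        acc ++ pvSel prev maxlen (pvGrp start prev rest)) := by
  intro rest
  induction rest with
  | nil =>
    intro prev start maxlen acc h1 h2
    simp only [pvLoopA, pvGrp]
    have hm : pvMaxLen [(start, prev)] = prev - start + 1 := by
      show max (prev - start + 1) 0 = prev - start + 1
      rw [max_eq_left (by omega)]
    simp only [hm]
    rw [if_neg (by omega : ¬(maxlen < prev - start + 1))]
    simp only [pvSel]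
    rw [if_neg (show ¬(prev - start + 1 = maxlen ∧ prev < prev) by simp)]
    simp
  | cons cur rest ih =>
    intro prev start maxlen acc h1 h2
    by_cases hc : cur - prev = 1
    · -- extension step
      have hg : pvGrp start prev (cur :: rest) = pvGrp start cur rest := by
        simp [pvGrp, hc]
      obtain ⟨e0, rs, hR, he0⟩ := pvGrp_head rest start cur
      have hM'ge : cur - start + 1 ≤ pvMaxLen (pvGrp start cur rest) :=
        pvMaxLen_grp_ge rest start cur (by omega)
      have hlen0 : e0 - start + 1 ≤ pvMaxLen (pvGrp start cur rest) := by
        have := le_pvMaxLen (r := (start, e0)) (R := pvGrp start cur rest)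
          (by rw [hR]; exact List.mem_cons_self)
        simpa using this
      rw [hg]
      simp only [pvLoopA]
      rw [if_pos hc]
      by_cases hgt : cur - start + 1 > maxlen
      · rw [if_pos hgt]
        rw [ih cur start (cur - start + 1) [(start, cur)] (by omega) (by omega)]
        rw [if_pos (show maxlen < pvMaxLen (pvGrp start cur rest) by omega)]
        by_cases hlt : cur - start + 1 < pvMaxLen (pvGrp start cur rest)
        · rw [if_pos hlt]
        · rw [if_neg hlt]
          have hMeq : pvMaxLen (pvGrp start cur rest) = cur - start + 1 := by omega
          have he0c : e0 = cur := by omega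
          rw [he0c] at hR
          rw [hMeq, hR]
          simp only [pvSel]
          rw [if_neg (show ¬(True ∧ cur < cur) by simp)]
          rw [List.filter_cons_of_pos (by simp)]
          simp only [List.nil_append, List.singleton_append]
          congr 1
          apply List.filter_congr
          intro r _
          exact decide_eq_decide.mpr (by omega)
      · rw [if_neg hgt]
        by_cases heq : cur - start + 1 = maxlen
        · rw [if_pos heq]
          rw [ih cur start maxlen (acc ++ [(start, cur)]) (by omega) (by omega)]
          by_cases hlt : maxlen < pvMaxLen (pvGrp start cur rest)
          · rw [if_pos hlt, if_pos hlt]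
          · rw [if_neg hlt, if_neg hlt]
            have he0c : e0 = cur := by omega
            rw [he0c] at hR
            rw [hR]
            simp only [pvSel]
            rw [if_neg (show ¬(cur - start + 1 = maxlen ∧ cur < cur) by simp),
                if_pos (show cur - start + 1 = maxlen ∧ prev < cur by constructor <;> omega)]
            simp
        · rw [if_neg heq]
          rw [ih cur start maxlen acc (by omega) (by omega)]
          by_cases hlt : maxlen < pvMaxLen (pvGrp start cur rest)
          · rw [if_pos hlt, if_pos hlt]
          · rw [if_neg hlt, if_neg hlt]
            rw [hR]
            simp only [pvSel]
            have hcond : (e0 - start + 1 = maxlen ∧ cur < e0) ↔ (e0 - start + 1 = maxlen ∧ prev < e0) := by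
              omega
            rw [if_congr hcond rfl rfl]
    · -- reset step
      have hg : pvGrp start prev (cur :: rest) = (start, prev) :: pvGrp cur cur rest := by
        simp [pvGrp, hc]
      simp only [pvLoopA, if_neg hc]
      rw [ih cur cur maxlen acc le_rfl (by omega)]
      rw [hg]
      have hMcons : pvMaxLen ((start, prev) :: pvGrp cur cur rest)
          = max (prev - start + 1) (pvMaxLen (pvGrp cur cur rest)) := rfl
      obtain ⟨e0, rs, hR, he0⟩ := pvGrp_head rest cur cur
      by_cases hlt : maxlen < pvMaxLen (pvGrp cur cur rest)
      · have hmax : max (prev - start + 1) (pvMaxLen (pvGrp cur cur rest))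
            = pvMaxLen (pvGrp cur cur rest) := max_eq_right (by omega)
        rw [if_pos hlt, hMcons, hmax, if_pos hlt]
        rw [List.filter_cons_of_neg (by simp; omega)]
      · have hge1 : 1 ≤ pvMaxLen (pvGrp cur cur rest) := by
          have := pvMaxLen_grp_ge rest cur cur le_rfl
          omega
        rw [if_neg hlt, hMcons]
        rw [if_neg (by
          intro hh
          rcases lt_max_iff.mp hh with h | h <;> omega)]
        rw [hR]
        simp only [pvSel]
        rw [if_neg (show ¬(prev - start + 1 = maxlen ∧ prev < prev) by simp)]
        by_cases hcnd : e0 - cur + 1 = maxlen ∧ cur < e0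
        · rw [if_pos hcnd, List.filter_cons_of_pos (by
            simp only [decide_eq_true_eq]
            exact ⟨hcnd.1, by omega⟩)]
          simp
        · rw [if_neg hcnd, List.filter_cons_of_neg (by
            simp only [decide_eq_true_eq, not_and]
            intro hh1 hh2
            exact hcnd ⟨hh1, by omega⟩)]

-- B's foldl builds exactly the runs
theorem pvFoldB (xs : List Int) : ∀ (pre : List (Int × Int)) (s p : Int),
    xs.foldl pvAddRun (pre ++ [(s, p)]) = pre ++ pvGrp s p xs := by
  induction xs with
  | nil => intro pre s p; simp [pvGrp]
  | cons cur rest ih =>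
    intro pre s p
    by_cases h : cur - p = 1
    · have hstep : pvAddRun (pre ++ [(s, p)]) cur = pre ++ [(s, cur)] := by
        simp [pvAddRun]
        omega
      simp only [List.foldl_cons, hstep, ih, pvGrp, h, if_true]
    · have hstep : pvAddRun (pre ++ [(s, p)]) cur = (pre ++ [(s, p)]) ++ [(cur, cur)] := by
        simp [pvAddRun]
        omega
      simp only [List.foldl_cons, hstep]
      rw [ih (pre ++ [(s, p)]) cur cur]
      simp [pvGrp, h]

-- the maximal run length is attained
theorem pvMaxLen_mem : ∀ (R : List (Int × Int)), (∀ r ∈ R, r.1 ≤ r.2) → R ≠ [] →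
    pvMaxLen R - 1 ∈ R.map (fun r => r.2 - r.1) := by
  intro R
  induction R with
  | nil => intro _ h; cases h rfl
  | cons r rs ih =>
    intro hR _
    by_cases hrs : rs = []
    · subst hrs
      have hr1 : r.1 ≤ r.2 := hR r List.mem_cons_self
      have hml : pvMaxLen [r] = r.2 - r.1 + 1 := by
        show max (r.2 - r.1 + 1) (pvMaxLen []) = r.2 - r.1 + 1
        show max (r.2 - r.1 + 1) 0 = r.2 - r.1 + 1
        omega
      rw [hml, List.map_cons]
      simp
    · have ihh := ih (fun x hx => hR x (List.mem_cons_of_mem _ hx)) hrs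
      have hcons : pvMaxLen (r :: rs) = max (r.2 - r.1 + 1) (pvMaxLen rs) := rfl
      by_cases hle : r.2 - r.1 + 1 ≤ pvMaxLen rs
      · have hEq : pvMaxLen (r :: rs) = pvMaxLen rs := by omega
        rw [List.map_cons, hEq]
        exact List.mem_cons_of_mem _ ihh
      · have hEq : pvMaxLen (r :: rs) - 1 = r.2 - r.1 := by omega
        rw [List.map_cons, hEq]
        exact List.mem_cons_self

theorem pvRuns_eq (qrest : List Int) (q0 : Int) :
    List.foldl pvAddRun [] (q0 :: qrest) = pvGrp q0 q0 qrest := by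
  rw [List.foldl_cons]
  have h0 : pvAddRun [] q0 = [] ++ [(q0, q0)] := rfl
  rw [h0, pvFoldB]
  simp

-- ===== VERDICT (by name: the statement is the Claim_ definition above) =====
theorem find_sublists_spec : Claim_equal_find_sublists := by
  unfold Claim_equal_find_sublists
  intro lst _hdom
  unfold Spec_find_sublists find_sublists find_sublists_alt
  rcases hF : (PySem.List.enumerate lst 0).filter pvQualTest with _ | ⟨f0, fs⟩
  · simp
  · simp only [List.map_cons, List.map_map, Function.comp_def]
    set q0 : Int := f0.1 with hq0
    set qrest : List Int := fs.map (fun p : Int × Int => p.1) with hqr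
    rw [pvLoopA_eq qrest q0 q0 1 [(q0, q0)] le_rfl (by omega)]
    rw [pvRuns_eq qrest q0]
    obtain ⟨e0, rs, hR, he0⟩ := pvGrp_head qrest q0 q0
    have hmem : ∀ r ∈ (q0, e0) :: rs, r.1 ≤ r.2 := by
      have h := pvGrp_mem_le qrest q0 q0 le_rfl
      rw [hR] at h; exact h
    have hM1 : 1 ≤ pvMaxLen ((q0, e0) :: rs) := by
      have h := pvMaxLen_grp_ge qrest q0 q0 le_rfl
      rw [hR] at h; omega
    have hhd : e0 - q0 + 1 ≤ pvMaxLen ((q0, e0) :: rs) := by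
      have h := le_pvMaxLen (r := (q0, e0)) (R := (q0, e0) :: rs) List.mem_cons_self
      simpa using h
    rw [hR]
    have hmax : ((e0 - q0) :: rs.map (fun r => r.2 - r.1)).max?
        = some (pvMaxLen ((q0, e0) :: rs) - 1) := by
      rw [List.max?_eq_some_iff]
      constructor
      · have h := pvMaxLen_mem ((q0, e0) :: rs) hmem (by simp)
        simpa using h
      · intro b hb
        simp only [List.mem_cons, List.mem_map] at hb
        rcases hb with hb | ⟨r, hr, rfl⟩
        · omega
        · have := le_pvMaxLen (R := (q0, e0) :: rs) (List.mem_cons_of_mem _ hr)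
          omega
    simp only [List.map_cons, hmax]
    by_cases hbig : 1 < pvMaxLen ((q0, e0) :: rs)
    · rw [if_pos hbig, if_neg (by omega : ¬(pvMaxLen ((q0, e0) :: rs) - 1 = 0))]
      apply List.filter_congr
      intro r _
      rw [Bool.eq_iff_iff]
      simp only [decide_eq_true_eq, beq_iff_eq]
      omega
    · have hMeq : pvMaxLen ((q0, e0) :: rs) = 1 := by omega
      rw [if_neg hbig, if_pos (by omega : pvMaxLen ((q0, e0) :: rs) - 1 = 0)]
      have he0q : e0 = q0 := by omega
      subst he0q
      simp only [pvSel]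
      rw [if_neg (by simp)]
      have hfil : rs.filter (fun r => decide (r.2 - r.1 + 1 = 1 ∧ 2 ≤ r.2 - r.1 + 1)) = [] := by
        rw [List.filter_eq_nil_iff]
        intro r hr
        simp only [decide_eq_true_eq, not_and]
        intro _
        omega
      rw [hfil]
      simp
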